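-- pv_equiv track=rewrite | github.com/Alexander2305Potosi/agent_ia_vulnerabilities | agent_ia/core/mutator.py | _find_balanced_block
-- ===== SOURCE A (Python) =====
-- def _find_balanced_block(content, start_index):
--     """
--     Encuentra el rango [start, end] de un bloque que empieza en { tras el start_index.
--     Retorna (start, end) o (None, None).
--     """
--     brace_start = content.find("{", start_index)
--     if brace_start == -1: return None, None
--
--     stack = 0
--     for i in range(brace_start, len(content)):
--         if content[i] == '{':
--             stack += 1
--         elif content[i] == '}':
--             stack -= 1
--             if stack == 0:
--                 return brace_start, i + 1
--     return None, None
-- ===== SOURCE B (Python) =====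
-- def _find_balanced_block(content, start_index):
--     """Jump between brace delimiters with str.find instead of scanning every character."""
--     brace_start = content.find("{", start_index)
--     if brace_start == -1:
--         return None, None
--     i = brace_start
--     depth = 0
--     while True:
--         nb = content.find("{", i)
--         nc = content.find("}", i)
--         if nc == -1:
--             return None, None
--         if nb != -1 and nb < nc:
--             depth += 1
--             i = nb + 1
--         else:
--             depth -= 1
--             if depth == 0:
--                 return brace_start, nc + 1
--             i = nc + 1
-- ===== Notes on version B (the rewrite author's own statement) =====
-- stated objective: alternative
-- what changed: A scans every character from the first '{' with a depth counter; B repeatedly calls str.find to jump directly to the nearer of the next '{' and next '}', adjusting the depth per delimiter and returning None early once no '}' remains.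
import Mathlib
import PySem

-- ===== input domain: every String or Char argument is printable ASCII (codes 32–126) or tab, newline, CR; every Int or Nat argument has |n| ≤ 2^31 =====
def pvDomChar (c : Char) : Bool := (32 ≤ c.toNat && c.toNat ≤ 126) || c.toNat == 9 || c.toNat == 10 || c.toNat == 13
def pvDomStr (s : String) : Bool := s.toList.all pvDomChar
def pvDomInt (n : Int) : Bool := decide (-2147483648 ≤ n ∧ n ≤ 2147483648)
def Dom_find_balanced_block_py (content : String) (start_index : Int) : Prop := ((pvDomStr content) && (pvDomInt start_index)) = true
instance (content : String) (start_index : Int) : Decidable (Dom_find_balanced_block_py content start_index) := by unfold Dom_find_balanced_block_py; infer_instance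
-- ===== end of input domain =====

-- B replaces A's per-character scan with str.find jumps to the next brace delimiter;
-- objective: alternative decomposition (B does less Python-level work between braces).

-- lemmas the ports need for termination (cited by name in decreasing_by)
theorem pvPrefix_singleton (c : Char) (l : List Char) : [c] <+: l ↔ l.head? = some c := by
  cases l with
  | nil => simp
  | cons x t => simp [List.cons_prefix_cons, eq_comm]

theorem pvFindFrom_past (cs : List Char) (sub : List Char) (i : Nat) (h : cs.length < i) :
    PySem.Chars.findFrom cs sub (i : Int) none = -1 := by
  unfold PySem.Chars.findFrom
  simp
  omega

theorem pvFindFrom_spec (cs : List Char) (c : Char) (i : Nat)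
    (h : PySem.Chars.findFrom cs [c] (i : Int) none ≠ -1) :
    i ≤ cs.length ∧ (i : Int) ≤ PySem.Chars.findFrom cs [c] (i : Int) none ∧
      PySem.Chars.findFrom cs [c] (i : Int) none < (cs.length : Int) ∧
      cs[(PySem.Chars.findFrom cs [c] (i : Int) none).toNat]? = some c := by
  have hk : i ≤ cs.length := by
    by_contra hgt
    exact h (pvFindFrom_past cs [c] i (by omega))
  obtain ⟨hle, hp, _⟩ := PySem.Chars.findFrom_natCast_spec cs [c] i hk h
  have hh : (cs.drop (PySem.Chars.findFrom cs [c] (i : Int) none).toNat).head? = some c :=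
    (pvPrefix_singleton c _).mp hp
  rw [List.head?_drop] at hh
  have hlt : (PySem.Chars.findFrom cs [c] (i : Int) none).toNat < cs.length :=
    (List.getElem?_eq_some_iff.mp hh).1
  exact ⟨hk, hle, by omega, hh⟩

-- ===== PORT A =====
-- the for-loop of _find_balanced_block: i over range(brace_start, len(content)), stack accumulator
def pvA_loop (cs : List Char) (bs : Int) (i : Nat) (stack : Int) : Option Int × Option Int :=
  if h : i < cs.length then
    if cs[i] = '{' then pvA_loop cs bs (i + 1) (stack + 1)
    else if cs[i] = '}' then
      if stack - 1 = 0 then (some bs, some ((i : Int) + 1))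
      else pvA_loop cs bs (i + 1) (stack - 1)
    else pvA_loop cs bs (i + 1) stack
  else (none, none)
termination_by cs.length - i

def find_balanced_block_py (content : String) (start_index : Int) : Option Int × Option Int :=
  let brace_start := PySem.Str.findFrom content "{" start_index none
  if brace_start = -1 then (none, none)
  else pvA_loop content.toList brace_start brace_start.toNat 0

-- ===== PORT B =====
-- B's while-loop: jump to the nearer of the next '{' and next '}' via find
def pvB_loop (cs : List Char) (bs : Int) (i : Nat) (depth : Int) : Option Int × Option Int :=
  let nb := PySem.Chars.findFrom cs ['{'] (i : Int) none
  let nc := PySem.Chars.findFrom cs ['}'] (i : Int) none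
  if hc : nc = -1 then (none, none)
  else if hb : nb ≠ -1 ∧ nb < nc then
    pvB_loop cs bs (nb.toNat + 1) (depth + 1)
  else if depth - 1 = 0 then (some bs, some (nc + 1))
  else pvB_loop cs bs (nc.toNat + 1) (depth - 1)
termination_by cs.length - i
decreasing_by
  · obtain ⟨hk, hle, hlt, -⟩ := pvFindFrom_spec cs '{' i hb.1
    omega
  · obtain ⟨hk, hle, hlt, -⟩ := pvFindFrom_spec cs '}' i hc
    omega

def find_balanced_block_py_alt (content : String) (start_index : Int) : Option Int × Option Int :=
  let brace_start := PySem.Str.findFrom content "{" start_index none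
  if brace_start = -1 then (none, none)
  else pvB_loop content.toList brace_start brace_start.toNat 0

-- ===== PRECONDITION & SPEC =====
def Spec_find_balanced_block_py (content : String) (start_index : Int) (out : Option Int × Option Int) : Prop := out = find_balanced_block_py_alt content start_index
instance (content : String) (start_index : Int) (out : Option Int × Option Int) : Decidable (Spec_find_balanced_block_py content start_index out) := by unfold Spec_find_balanced_block_py; infer_instance

-- ===== CLAIM (what is proved, stated in full; the proofs are below) =====
def Claim_equal_find_balanced_block_py : Prop := ∀ (content : String) (start_index : Int), Dom_find_balanced_block_py content start_index → Spec_find_balanced_block_py content start_index (find_balanced_block_py content start_index)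

-- ===== LEMMAS AND PROOFS =====
theorem pvInfix_singleton (c : Char) (l : List Char) : [c] <:+: l ↔ c ∈ l := by
  constructor
  · intro h; exact h.mem (by simp)
  · intro h
    obtain ⟨a, b, rfl⟩ := List.mem_iff_append.mp h
    exact ⟨a, b, by simp⟩

theorem pvFind_head (c : Char) (l : List Char) (h : l.head? = some c) :
    PySem.Chars.find l [c] = 0 := by
  have hmem : c ∈ l := by cases l <;> simp_all
  have h0 : (0:Int) ≤ PySem.Chars.find l [c] :=
    (PySem.Chars.find_nonneg_iff l [c]).mpr ((pvInfix_singleton c l).mpr hmem)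
  obtain ⟨hp, hmin⟩ := PySem.Chars.find_spec h0
  by_contra hne
  have : ¬ [c] <+: l.drop 0 := hmin 0 (by omega)
  simp [pvPrefix_singleton, h] at this

theorem pvFind_cons_ne (x c : Char) (t : List Char) (hx : x ≠ c) :
    PySem.Chars.find (x :: t) [c] =
      if PySem.Chars.find t [c] = -1 then -1 else PySem.Chars.find t [c] + 1 := by
  by_cases hm : c ∈ t
  · have hmt : (0:Int) ≤ PySem.Chars.find t [c] :=
      (PySem.Chars.find_nonneg_iff t [c]).mpr ((pvInfix_singleton c t).mpr hm)
    have hmn : (0:Int) ≤ PySem.Chars.find (x :: t) [c] :=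
      (PySem.Chars.find_nonneg_iff _ [c]).mpr ((pvInfix_singleton c _).mpr (by simp [hm]))
    obtain ⟨hpt, hmint⟩ := PySem.Chars.find_spec hmt
    obtain ⟨hpn, hminn⟩ := PySem.Chars.find_spec hmn
    set m := PySem.Chars.find t [c] with hmdef
    set n := PySem.Chars.find (x :: t) [c] with hndef
    have hn0 : n.toNat ≠ 0 := by
      intro h0
      rw [h0] at hpn
      simp at hpn
      exact hx (by simpa using hpn.symm)
    have hdropn : (x :: t).drop n.toNat = t.drop (n.toNat - 1) := by
      cases hnn : n.toNat with
      | zero => omega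
      | succ k => simp
    rw [hdropn] at hpn
    have h1 : m.toNat ≤ n.toNat - 1 := by
      by_contra hlt
      exact (hmint (n.toNat - 1) (by omega)) hpn
    have h2 : n.toNat ≤ m.toNat + 1 := by
      by_contra hlt
      have : ¬ [c] <+: (x :: t).drop (m.toNat + 1) := hminn (m.toNat + 1) (by omega)
      simp at this
      exact this hpt
    have : n = m + 1 := by omega
    rw [this]
    have : m ≠ -1 := by omega
    simp [this]
  · have h1 : PySem.Chars.find t [c] = -1 :=
      (PySem.Chars.find_eq_neg_one_iff t [c]).mpr (by simp [pvInfix_singleton, hm])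
    have h2 : PySem.Chars.find (x :: t) [c] = -1 :=
      (PySem.Chars.find_eq_neg_one_iff _ [c]).mpr (by simp [pvInfix_singleton, hm, hx.symm])
    simp [h1, h2]

theorem pvFindFrom_len (cs : List Char) (c : Char) :
    PySem.Chars.findFrom cs [c] (cs.length : Int) none = -1 := by
  rw [PySem.Chars.findFrom_natCast cs [c] cs.length le_rfl]
  have h0 : PySem.Chars.find ([] : List Char) [c] = -1 := by
    rw [PySem.Chars.find_eq_neg_one_iff]
    simp
  simp [h0]

theorem pvFindFrom_hit (cs : List Char) (c : Char) (i : Nat) (h : cs[i]? = some c) :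
    PySem.Chars.findFrom cs [c] (i : Int) none = i := by
  have hi : i < cs.length := (List.getElem?_eq_some_iff.mp h).1
  rw [PySem.Chars.findFrom_natCast cs [c] i (by omega)]
  have h0 : PySem.Chars.find (cs.drop i) [c] = 0 :=
    pvFind_head c _ (by rw [List.head?_drop]; exact h)
  simp [h0]

theorem pvFindFrom_miss (cs : List Char) (c x : Char) (i : Nat)
    (h : cs[i]? = some x) (hx : x ≠ c) :
    PySem.Chars.findFrom cs [c] (i : Int) none =
      PySem.Chars.findFrom cs [c] ((i + 1 : Nat) : Int) none := by
  have hi : i < cs.length := (List.getElem?_eq_some_iff.mp h).1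
  have hd : cs.drop i = x :: cs.drop (i + 1) := by
    rw [List.drop_eq_getElem_cons hi]
    simp [(List.getElem?_eq_some_iff.mp h).2]
  rw [PySem.Chars.findFrom_natCast cs [c] i (by omega),
      PySem.Chars.findFrom_natCast cs [c] (i + 1) (by omega), hd,
      pvFind_cons_ne x c _ hx]
  by_cases hm : PySem.Chars.find (cs.drop (i + 1)) [c] = -1
  · simp [hm]
  · have : (0:Int) ≤ PySem.Chars.find (cs.drop (i + 1)) [c] := by
      have := PySem.Chars.neg_one_le_find (cs.drop (i + 1)) [c]
      omega
    simp [hm]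
    omega

theorem pvFindFrom_int_bounds (cs sub : List Char) (start : Int)
    (h : PySem.Chars.findFrom cs sub start none ≠ -1) :
    0 ≤ PySem.Chars.findFrom cs sub start none ∧
      PySem.Chars.findFrom cs sub start none ≤ (cs.length : Int) := by
  have hr := PySem.Chars.neg_one_le_find (List.drop (if start < 0 then if start + cs.length < 0 then 0 else start + cs.length else start).toNat (List.take (cs.length : Int).toNat cs)) sub
  have hl := PySem.Chars.find_le_length (List.drop (if start < 0 then if start + cs.length < 0 then 0 else start + cs.length else start).toNat (List.take (cs.length : Int).toNat cs)) sub
  unfold PySem.Chars.findFrom at h ⊢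
  simp only [List.length_drop, List.length_take] at hl
  split_ifs at h ⊢ <;> simp_all <;> omega

-- B's loop does not change when stepped past a non-brace character
theorem pvB_skip (cs : List Char) (bs : Int) (i : Nat) (d : Int) (x : Char)
    (h : cs[i]? = some x) (h1 : x ≠ '{') (h2 : x ≠ '}') :
    pvB_loop cs bs i d = pvB_loop cs bs (i + 1) d := by
  conv_lhs => rw [pvB_loop]
  conv_rhs => rw [pvB_loop]
  rw [pvFindFrom_miss cs '{' x i h h1, pvFindFrom_miss cs '}' x i h h2]

-- the two loops agree from any position i ≤ |cs| and any counter value d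
theorem pvLoop_eq (cs : List Char) (bs : Int) :
    ∀ (n i : Nat) (d : Int), cs.length - i ≤ n → i ≤ cs.length →
      pvA_loop cs bs i d = pvB_loop cs bs i d := by
  intro n
  induction n with
  | zero =>
    intro i d hn hi
    have hik : i = cs.length := by omega
    subst hik
    rw [pvA_loop, pvB_loop]
    simp [pvFindFrom_len]
  | succ n ih =>
    intro i d hn hi
    by_cases hlt : i < cs.length
    · have hx : cs[i]? = some cs[i] := List.getElem?_eq_some_iff.mpr ⟨hlt, rfl⟩
      by_cases ho : cs[i] = '{'
      · rw [ho] at hx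
        have hAB : pvA_loop cs bs i d = pvB_loop cs bs (i + 1) (d + 1) := by
          rw [pvA_loop]
          simp only [hlt, dif_pos, ho, if_pos]
          exact ih (i + 1) (d + 1) (by omega) (by omega)
        have hB : pvB_loop cs bs i d = pvB_loop cs bs (i + 1) (d + 1) := by
          conv_lhs => rw [pvB_loop]
          rw [pvFindFrom_hit cs '{' i hx,
              pvFindFrom_miss cs '}' '{' i hx (by decide)]
          by_cases hc : PySem.Chars.findFrom cs ['}'] ((i + 1 : Nat) : Int) none = -1
          · rw [dif_pos hc]
            conv_rhs => rw [pvB_loop]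
            rw [dif_pos hc]
          · rw [dif_neg hc]
            have hspec := pvFindFrom_spec cs '}' (i + 1) hc
            have hclose : cs[(PySem.Chars.findFrom cs ['}'] ((i + 1 : Nat) : Int) none).toNat]? = some '}' := hspec.2.2.2
            have hblt : (i : Int) < PySem.Chars.findFrom cs ['}'] ((i + 1 : Nat) : Int) none := by
              have := hspec.2.1
              omega
            rw [dif_pos (show (i : Int) ≠ -1 ∧ (i : Int) < _ from ⟨by omega, hblt⟩)]
            have hti : ((i : Int)).toNat = i := by omega
            rw [hti]
        rw [hAB, hB]
      · by_cases hcl : cs[i] = '}'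
        · rw [hcl] at hx
          have hnchit : PySem.Chars.findFrom cs ['}'] (i : Int) none = i := pvFindFrom_hit cs '}' i hx
          rw [pvA_loop]
          simp only [hlt, dif_pos, hcl, if_pos]
          conv_rhs => rw [pvB_loop]
          rw [hnchit]
          rw [dif_neg (show (i : Int) ≠ -1 by omega)]
          have hbfalse : ¬ (PySem.Chars.findFrom cs ['{'] (i : Int) none ≠ -1 ∧
              PySem.Chars.findFrom cs ['{'] (i : Int) none < (i : Int)) := by
            rintro ⟨hb1, hb2⟩
            have := (pvFindFrom_spec cs '{' i hb1).2.1
            omega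
          rw [dif_neg hbfalse]
          by_cases hz : d - 1 = 0
          · simp [hz]
          · rw [if_neg hz, if_neg hz]
            have : ((i : Int)).toNat = i := by omega
            rw [this]
            exact ih (i + 1) (d - 1) (by omega) (by omega)
        · rw [pvA_loop]
          simp only [hlt, dif_pos, ho, hcl]
          rw [ih (i + 1) d (by omega) (by omega)]
          exact (pvB_skip cs bs i d cs[i] hx ho hcl).symm
    · have hik : i = cs.length := by omega
      subst hik
      rw [pvA_loop, pvB_loop]
      simp [pvFindFrom_len]

-- ===== VERDICT (by name: the statement is the Claim_ definition above) =====
theorem find_balanced_block_py_spec : Claim_equal_find_balanced_block_py := by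
  intro content start_index _
  unfold Spec_find_balanced_block_py find_balanced_block_py find_balanced_block_py_alt
  simp only [PySem.Str.findFrom_eq]
  set bs := PySem.Chars.findFrom content.toList "{".toList start_index none with hbs
  by_cases h : bs = -1
  · simp [h]
  · rw [if_neg h, if_neg h]
    obtain ⟨h0, hle⟩ := pvFindFrom_int_bounds content.toList "{".toList start_index h
    exact pvLoop_eq content.toList bs content.toList.length bs.toNat 0 (by omega) (by omega)
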